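-- pv_equiv track=rewrite | github.com/Ads369/oten | en_statistic_monitor.py | second_to_string
-- ===== SOURCE A (Python) =====
-- def second_to_string(seconds=None, granularity=2):
--     intervals = (
--         # ('weeks', 604800),  # 60 * 60 * 24 * 7
--         ('days', 86400),  # 60 * 60 * 24
--         ('hours', 3600),  # 60 * 60
--         ('minutes', 60),
--         ('seconds', 1),
--     )
--     result = []
--
--     for name, count in intervals:
--         value = seconds // count
--         if value:
--             seconds -= value * count
--             if value == 1:
--                 name = name.rstrip('s')
--             result.append("{}{}".format(value, name[:1]))
--     return ' '.join(result[:granularity])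
-- ===== SOURCE B (Python) =====
-- def second_to_string(seconds=None, granularity=2):
--     # Recursive divmod chain from the SMALL end: peel off seconds, then minutes,
--     # then hours, threading the quotient; the result list is built back-to-front
--     # (largest unit first) by the recursion's return path.
--     def peel(q, steps):
--         if not steps:
--             return [(q, 'd')]
--         (div, unit), rest = steps[0], steps[1:]
--         q2, r = divmod(q, div)
--         return peel(q2, rest) + [(r, unit)]
--
--     parts = peel(seconds, [(60, 's'), (60, 'm'), (24, 'h')])
--     kept = [str(v) + u for v, u in parts if v]
--     return ' '.join(kept[:granularity])
-- ===== Notes on version B (the rewrite author's own statement) =====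
-- stated objective: alternative
-- what changed: Replaces A's iterative accumulator loop over a unit table (repeated floor-div on a running remainder, rstrip of plural names, slicing the name) with a recursive divmod chain that peels units from the small end (seconds, minutes, hours) threading the quotient, builds the component list back-to-front on the recursion's return path, then filters zeros and slices.
import Mathlib
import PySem

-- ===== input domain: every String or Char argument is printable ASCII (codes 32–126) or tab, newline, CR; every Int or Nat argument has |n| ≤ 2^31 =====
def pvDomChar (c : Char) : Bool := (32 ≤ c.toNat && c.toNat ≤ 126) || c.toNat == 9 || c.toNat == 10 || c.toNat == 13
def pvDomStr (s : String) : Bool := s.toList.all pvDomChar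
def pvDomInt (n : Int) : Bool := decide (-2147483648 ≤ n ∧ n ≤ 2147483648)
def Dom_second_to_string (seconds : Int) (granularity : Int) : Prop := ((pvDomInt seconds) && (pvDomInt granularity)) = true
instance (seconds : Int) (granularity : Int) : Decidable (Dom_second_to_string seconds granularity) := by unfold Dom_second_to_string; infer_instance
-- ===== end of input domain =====

-- B replaces A's accumulator loop with a recursive small-end divmod chain built back-to-front; objective: alternative.


-- ===== PORT A =====
-- exact hand port of str.rstrip('s'): drop all trailing 's' code points (PySem has no rstrip-with-chars)
def pvRstripS (s : String) : String := String.ofList ((s.toList.reverse.dropWhile (· = 's')).reverse)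

def second_to_string (seconds : Int) (granularity : Int) : String :=
  let intervals : List (String × Int) :=
    [("days", 86400), ("hours", 3600), ("minutes", 60), ("seconds", 1)]
  let st := intervals.foldl (fun (st : Int × List String) nc =>
    let value := PySem.Int.floordiv st.1 nc.2
    if value ≠ 0 then
      let secs := st.1 - value * nc.2
      let name := if value = 1 then pvRstripS nc.1 else nc.1
      (secs, st.2 ++ [PySem.Int.toStr value ++ PySem.Str.slice name none (some 1)])
    else st) (seconds, [])
  PySem.Str.join " " (PySem.List.slice st.2 none (some granularity))

-- ===== PORT B =====
-- Source B's recursive 'peel': divmod chain threading the quotient, list built on the return path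
def pvPeel (q : Int) (steps : List (Int × String)) : List (Int × String) :=
  match steps with
  | [] => [(q, "d")]
  | (div, unit) :: rest =>
    pvPeel (PySem.Int.floordiv q div) rest ++ [(PySem.Int.mod q div, unit)]

def second_to_string_alt (seconds : Int) (granularity : Int) : String :=
  let parts := pvPeel seconds [(60, "s"), (60, "m"), (24, "h")]
  let kept := (parts.filter (fun p => p.1 ≠ 0)).map (fun p => PySem.Int.toStr p.1 ++ p.2)
  PySem.Str.join " " (PySem.List.slice kept none (some granularity))

-- ===== PRECONDITION & SPEC =====
def Spec_second_to_string (seconds : Int) (granularity : Int) (out : String) : Prop := out = second_to_string_alt seconds granularity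
instance (seconds : Int) (granularity : Int) (out : String) : Decidable (Spec_second_to_string seconds granularity out) := by unfold Spec_second_to_string; infer_instance

-- ===== CLAIM (what is proved, stated in full; the proofs are below) =====
def Claim_equal_second_to_string : Prop := ∀ (seconds : Int) (granularity : Int), Dom_second_to_string seconds granularity → Spec_second_to_string seconds granularity (second_to_string seconds granularity)

-- ===== LEMMAS AND PROOFS =====

-- A's loop step: subtracting value*count leaves exactly the floor remainder
theorem pv_step {α : Type} (a b : Int) (X Y : α) :
    (if PySem.Int.floordiv a b ≠ 0 then (a - PySem.Int.floordiv a b * b, X) else (a, Y))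
      = (PySem.Int.mod a b, if PySem.Int.floordiv a b ≠ 0 then X else Y) := by
  have h := PySem.Int.floordiv_mul_add_mod a b
  split_ifs with h0
  · exact Prod.ext (by simp; omega) rfl
  · have h0' : PySem.Int.floordiv a b = 0 := not_not.mp h0
    rw [h0'] at h
    exact Prod.ext (by simp; omega) rfl

theorem pv_floordiv_one (a : Int) : PySem.Int.floordiv a 1 = a := by
  have h := PySem.Int.floordiv_mul_add_mod a 1
  have hm : PySem.Int.mod a 1 = a % 1 := PySem.Int.mod_eq_emod_of_pos (by omega)
  omega

-- small-end chain ↔ A's big-end remainder fields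
theorem pv_days (a : Int) :
    PySem.Int.floordiv (PySem.Int.floordiv (PySem.Int.floordiv a 60) 60) 24
      = PySem.Int.floordiv a 86400 := by
  rw [PySem.Int.floordiv_eq_ediv_of_pos (by omega), PySem.Int.floordiv_eq_ediv_of_pos (by omega),
      PySem.Int.floordiv_eq_ediv_of_pos (by omega), PySem.Int.floordiv_eq_ediv_of_pos (by omega)]
  omega

theorem pv_hours (a : Int) :
    PySem.Int.mod (PySem.Int.floordiv (PySem.Int.floordiv a 60) 60) 24
      = PySem.Int.floordiv (PySem.Int.mod a 86400) 3600 := by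
  rw [PySem.Int.floordiv_eq_ediv_of_pos (by omega), PySem.Int.floordiv_eq_ediv_of_pos (by omega),
      PySem.Int.floordiv_eq_ediv_of_pos (by omega), PySem.Int.mod_eq_emod_of_pos (by omega),
      PySem.Int.mod_eq_emod_of_pos (by omega)]
  omega

theorem pv_minutes (a : Int) :
    PySem.Int.mod (PySem.Int.floordiv a 60) 60
      = PySem.Int.floordiv (PySem.Int.mod a 3600) 60 := by
  rw [PySem.Int.floordiv_eq_ediv_of_pos (by omega), PySem.Int.floordiv_eq_ediv_of_pos (by omega),
      PySem.Int.mod_eq_emod_of_pos (by omega), PySem.Int.mod_eq_emod_of_pos (by omega)]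
  omega

-- per-interval string on A's side: the rstrip / name[:1] dance always yields the unit's first letter
theorem pv_entry (v : Int) (name letter : String)
    (h1 : PySem.Str.slice name none (some 1) = letter)
    (h2 : PySem.Str.slice (pvRstripS name) none (some 1) = letter) :
    (PySem.Int.toStr v ++ PySem.Str.slice (if v = 1 then pvRstripS name else name) none (some 1))
      = PySem.Int.toStr v ++ letter := by
  by_cases hv : v = 1 <;> simp [hv, h1, h2]

theorem pv_entry_days (v : Int) :
    (PySem.Int.toStr v ++ PySem.Str.slice (if v = 1 then pvRstripS "days" else "days") none (some 1))
      = PySem.Int.toStr v ++ "d" := pv_entry v "days" "d" (by decide) (by decide)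

theorem pv_entry_hours (v : Int) :
    (PySem.Int.toStr v ++ PySem.Str.slice (if v = 1 then pvRstripS "hours" else "hours") none (some 1))
      = PySem.Int.toStr v ++ "h" := pv_entry v "hours" "h" (by decide) (by decide)

theorem pv_entry_minutes (v : Int) :
    (PySem.Int.toStr v ++ PySem.Str.slice (if v = 1 then pvRstripS "minutes" else "minutes") none (some 1))
      = PySem.Int.toStr v ++ "m" := pv_entry v "minutes" "m" (by decide) (by decide)

theorem pv_entry_seconds (v : Int) :
    (PySem.Int.toStr v ++ PySem.Str.slice (if v = 1 then pvRstripS "seconds" else "seconds") none (some 1))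
      = PySem.Int.toStr v ++ "s" := pv_entry v "seconds" "s" (by decide) (by decide)

-- ===== VERDICT (by name: the statement is the Claim_ definition above) =====
theorem second_to_string_spec : Claim_equal_second_to_string := by
  intro seconds granularity _
  unfold Spec_second_to_string second_to_string second_to_string_alt
  simp only [pvPeel, List.cons_append, List.nil_append, List.foldl, List.filter]
  rw [pv_step, pv_step, pv_step, pv_step]
  simp only [pv_floordiv_one, pv_days, pv_hours, pv_minutes,
    pv_entry_days, pv_entry_hours, pv_entry_minutes, pv_entry_seconds]
  by_cases h1 : seconds / 86400 = 0 <;>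
  by_cases h2 : seconds % 86400 / 3600 = 0 <;>
  by_cases h3 : seconds % 3600 / 60 = 0 <;>
  by_cases h4 : (60 : Int) ∣ seconds <;>
  simp [h1, h2, h3, h4, List.map]
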